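-- pv_equiv track=rewrite | github.com/Merlness/AoC | 2017/day_3.py | find_square_roots
-- ===== SOURCE A (Python) =====
-- def find_square_roots(number):
--     for s_root in range(number+1):
--         s_root = 1
--         boxes_away_from_center = []
--         while number > s_root*s_root :
--             s_root += 2
--             boxes_away_from_center.append(s_root)
--
--     return s_root, boxes_away_from_center
-- ===== SOURCE B (Python) =====
-- def find_square_roots(number):
--     # Binary search for c = ceil(sqrt(number)) instead of A's quadratic scan.
--     lo, hi = 0, number
--     while lo < hi:
--         mid = (lo + hi) // 2
--         if mid * mid < number:
--             lo = mid + 1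
--         else:
--             hi = mid
--     s_root = lo if lo % 2 == 1 else lo + 1
--     return s_root, list(range(3, s_root + 1, 2))
-- ===== Notes on version B (the rewrite author's own statement) =====
-- stated objective: faster
-- what changed: Replaces A's outer range(number+1) re-scan and inner step-by-2 linear search with a single binary search for ceil(sqrt(number)), then builds the odd result and the boxes list directly with range(3, s_root+1, 2).
import Mathlib
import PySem

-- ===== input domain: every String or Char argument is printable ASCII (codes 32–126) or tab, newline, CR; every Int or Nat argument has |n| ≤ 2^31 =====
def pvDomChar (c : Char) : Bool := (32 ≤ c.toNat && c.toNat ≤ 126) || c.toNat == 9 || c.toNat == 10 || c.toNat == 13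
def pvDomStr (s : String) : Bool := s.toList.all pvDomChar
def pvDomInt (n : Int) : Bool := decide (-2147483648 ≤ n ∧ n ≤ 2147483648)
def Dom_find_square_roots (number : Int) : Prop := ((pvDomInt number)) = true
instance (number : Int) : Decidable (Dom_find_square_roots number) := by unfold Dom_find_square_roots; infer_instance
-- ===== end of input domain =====

-- B replaces A's quadratic rescanning loop by a binary search for ceil(sqrt(number));
-- equivalence is proved for number ≥ 0 (Pre_); on number < 0 A raises UnboundLocalError.

-- ===== PORT A =====
-- s*s grows, so number - s shrinks: used by pvLoopA's decreasing_by
theorem pv_le_mul_self (s : Int) : s ≤ s * s := by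
  rcases le_or_gt s 0 with h | h
  · nlinarith [mul_self_nonneg s]
  · nlinarith

-- inner 'while number > s_root*s_root: s_root += 2; boxes.append(s_root)'
def pvLoopA (number s : Int) (boxes : List Int) : Int × List Int :=
  if number > s * s then pvLoopA number (s + 2) (boxes ++ [s + 2]) else (s, boxes)
termination_by (number - s).toNat
decreasing_by
  have h := pv_le_mul_self s
  omega

-- 'for s_root in range(number+1):' re-runs the same body; if the range is empty the
-- locals stay unbound (UnboundLocalError, excluded by Pre_) — modelled by the none
-- accumulator and the .getD placeholder.
def find_square_roots (number : Int) : Int × List Int :=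
  ((PySem.List.pyRange 0 (number + 1) 1).foldl
      (fun _ _ => some (pvLoopA number 1 [])) none).getD (0, [])

-- ===== PORT B =====
-- binary-search loop of Source B; mid = (lo + hi) // 2 inlined
def pvBS (number lo hi : Int) : Int :=
  if lo < hi then
    if (PySem.Int.floordiv (lo + hi) 2) * (PySem.Int.floordiv (lo + hi) 2) < number then
      pvBS number (PySem.Int.floordiv (lo + hi) 2 + 1) hi
    else
      pvBS number lo (PySem.Int.floordiv (lo + hi) 2)
  else lo
termination_by (hi - lo).toNat
decreasing_by
  · have h1 := (PySem.Int.floordiv_two_mid_bounds (le_of_lt (by assumption : lo < hi))).1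
    omega
  · have h2 : PySem.Int.floordiv (lo + hi) 2 < hi :=
      (PySem.Int.floordiv_lt_iff_lt_mul (by norm_num)).2 (by omega)
    omega

def find_square_roots_alt (number : Int) : Int × List Int :=
  let c := pvBS number 0 number
  let s_root := if PySem.Int.mod c 2 = 1 then c else c + 1
  (s_root, PySem.List.pyRange 3 (s_root + 1) 2)

-- ===== PRECONDITION & SPEC =====
-- Pre_ excludes number < 0, where A raises UnboundLocalError (the for-range is empty).
def Pre_find_square_roots (number : Int) : Prop := 0 ≤ number
instance (number : Int) : Decidable (Pre_find_square_roots number) := by unfold Pre_find_square_roots; infer_instance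
def pvWitness_find_square_roots : Int := 10

def Spec_find_square_roots (number : Int) (out : Int × List Int) : Prop := out = find_square_roots_alt number
instance (number : Int) (out : Int × List Int) : Decidable (Spec_find_square_roots number out) := by unfold Spec_find_square_roots; infer_instance

-- ===== CLAIM (what is proved, stated in full; the proofs are below) =====
def Claim_equal_find_square_roots : Prop := ∀ (number : Int), Dom_find_square_roots number → Pre_find_square_roots number → Spec_find_square_roots number (find_square_roots number)

-- ===== LEMMAS AND PROOFS =====

-- step-2 range: empty when b ≤ a
lemma pyRange_two_nil (a b : Int) (h : b ≤ a) : PySem.List.pyRange a b 2 = [] := by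
  rw [PySem.List.pyRange_of_pos a b (by norm_num)]
  rw [if_neg (by omega)]
  simp

-- step-2 range: cons when a < b
lemma pyRange_two_cons (a b : Int) (h : a < b) :
    PySem.List.pyRange a b 2 = a :: PySem.List.pyRange (a + 2) b 2 := by
  rw [PySem.List.pyRange_of_pos a b (by norm_num),
      PySem.List.pyRange_of_pos (a + 2) b (by norm_num)]
  have hc : (if a < b then ((b - a + 2 - 1) / 2).toNat else 0)
      = (if a + 2 < b then ((b - (a + 2) + 2 - 1) / 2).toNat else 0) + 1 := by
    split_ifs <;> omega
  rw [hc, List.range_succ_eq_map]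
  simp only [List.map_cons, List.map_map]
  congr 1
  · push_cast; ring
  · apply List.map_congr_left
    intro k _
    simp only [Function.comp]
    push_cast
    ring

-- A's inner while loop: result r, boxes appended = range(s+2, r+1, 2), r ≡ s (mod 2),
-- r*r ≥ number, and r is minimal (previous candidate fails unless r = s)
lemma pvLoopA_spec (number : Int) : ∀ (s : Int) (boxes : List Int),
    ∃ r, pvLoopA number s boxes = (r, boxes ++ PySem.List.pyRange (s + 2) (r + 1) 2) ∧
      (∃ k : Nat, r = s + 2 * (k : Int)) ∧ number ≤ r * r ∧
      (r = s ∨ number > (r - 2) * (r - 2)) := by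
  intro s boxes
  induction s, boxes using pvLoopA.induct (number := number) with
  | case1 s boxes hgt ih =>
    obtain ⟨r, heq, ⟨k, hk⟩, hsq, hmin⟩ := ih
    refine ⟨r, ?_, ⟨k + 1, by push_cast; omega⟩, hsq, ?_⟩
    · rw [pvLoopA, if_pos hgt, heq]
      have hr : s + 2 ≤ r := by omega
      rw [pyRange_two_cons (s + 2) (r + 1) (by omega)]
      simp
    · right
      rcases hmin with h | h
      · have : (r - 2) * (r - 2) = s * s := by rw [show r - 2 = s by omega]
        omega
      · exact h
  | case2 s boxes hle =>
    refine ⟨s, ?_, ⟨0, by omega⟩, by omega, Or.inl rfl⟩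
    rw [pvLoopA, if_neg hle, pyRange_two_nil _ _ (by omega)]
    simp

-- B's binary search: returns c with 0 ≤ c, number ≤ c*c, minimal
lemma pvBS_spec (number : Int) : ∀ (lo hi : Int),
    0 ≤ lo → lo ≤ hi → number ≤ hi * hi → (lo = 0 ∨ (lo - 1) * (lo - 1) < number) →
    0 ≤ pvBS number lo hi ∧ number ≤ pvBS number lo hi * pvBS number lo hi ∧
      (pvBS number lo hi = 0 ∨ (pvBS number lo hi - 1) * (pvBS number lo hi - 1) < number) := by
  intro lo hi
  induction lo, hi using pvBS.induct (number := number) with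
  | case1 lo hi hlt hmid ih =>
    intro h0 hlh hhi hlo
    rw [pvBS, if_pos hlt, if_pos hmid]
    have hb := PySem.Int.floordiv_two_mid_bounds (le_of_lt hlt)
    have hm2 : PySem.Int.floordiv (lo + hi) 2 < hi :=
      (PySem.Int.floordiv_lt_iff_lt_mul (by norm_num)).2 (by omega)
    apply ih (by omega) (by omega) hhi
    right
    have : PySem.Int.floordiv (lo + hi) 2 + 1 - 1 = PySem.Int.floordiv (lo + hi) 2 := by ring
    rw [this]
    exact hmid
  | case2 lo hi hlt hmid ih =>
    intro h0 hlh hhi hlo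
    rw [pvBS, if_pos hlt, if_neg hmid]
    have hb := PySem.Int.floordiv_two_mid_bounds (le_of_lt hlt)
    exact ih h0 hb.1 (by omega) hlo
  | case3 lo hi hlt =>
    intro h0 hlh hhi hlo
    rw [pvBS, if_neg hlt]
    have : lo = hi := by omega
    subst this
    exact ⟨h0, hhi, hlo⟩

-- the minimal odd root with square ≥ number is unique
lemma pv_odd_min_unique (number r1 r2 : Int)
    (h1 : ∃ k : Nat, r1 = 1 + 2 * (k : Int)) (h2 : ∃ k : Nat, r2 = 1 + 2 * (k : Int))
    (hq1 : number ≤ r1 * r1) (hq2 : number ≤ r2 * r2)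
    (hm1 : r1 = 1 ∨ number > (r1 - 2) * (r1 - 2))
    (hm2 : r2 = 1 ∨ number > (r2 - 2) * (r2 - 2)) : r1 = r2 := by
  obtain ⟨k1, hk1⟩ := h1
  obtain ⟨k2, hk2⟩ := h2
  rcases lt_trichotomy r1 r2 with h | h | h
  · exfalso
    rcases hm2 with h2' | h2'
    · omega
    · have hle : r1 ≤ r2 - 2 := by omega
      have : r1 * r1 ≤ (r2 - 2) * (r2 - 2) := by nlinarith
      omega
  · exact h
  · exfalso
    rcases hm1 with h1' | h1'
    · omega
    · have hle : r2 ≤ r1 - 2 := by omega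
      have : r2 * r2 ≤ (r1 - 2) * (r1 - 2) := by nlinarith
      omega

lemma pv_foldl_const_some {α β : Type} (v : β) :
    ∀ (l : List α) (init : β), l ≠ [] → l.foldl (fun _ _ => v) init = v := by
  intro l
  induction l with
  | nil => intro _ h; exact absurd rfl h
  | cons a t ih =>
    intro init _
    rcases t with _ | ⟨b, t'⟩
    · rfl
    · exact ih v (by simp)

-- ===== VERDICT (by name: the statement is the Claim_ definition above) =====
theorem find_square_roots_spec : Claim_equal_find_square_roots := by
  intro number _ hpre
  unfold Spec_find_square_roots
  have hpre' : (0 : Int) ≤ number := hpre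
  -- A's value
  have hA : find_square_roots number = pvLoopA number 1 [] := by
    unfold find_square_roots
    rw [pv_foldl_const_some]
    · rfl
    · rw [PySem.List.pyRange_one_cons (by omega)]
      simp
  obtain ⟨r, hre, hodd, hsq, hmin⟩ := pvLoopA_spec number 1 []
  have hmin' : r = 1 ∨ number > (r - 2) * (r - 2) := hmin
  -- B's value
  have hB := pvBS_spec number 0 number le_rfl hpre'
    (le_trans (pv_le_mul_self number) le_rfl) (Or.inl rfl)
  obtain ⟨hc0, hcsq, hcmin⟩ := hB
  set c := pvBS number 0 number with hc
  -- B's s_root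
  rcases Int.even_or_odd c with ⟨m, hm⟩ | ⟨m, hm⟩
  · -- c even: mod c 2 = 0, s_root = c + 1
    have hmod : PySem.Int.mod c 2 = 0 := by
      rw [PySem.Int.mod_eq_emod_of_pos (by norm_num)]; omega
    have hBval : find_square_roots_alt number
        = (c + 1, PySem.List.pyRange 3 (c + 1 + 1) 2) := by
      simp only [find_square_roots_alt]
      rw [← hc, hmod]
      norm_num
    have hreq : r = c + 1 := by
      apply pv_odd_min_unique number r (c + 1) hodd
      · exact ⟨m.toNat, by omega⟩
      · exact hsq
      · nlinarith
      · exact hmin'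
      · rcases hcmin with h | h
        · left; omega
        · right
          have : c + 1 - 2 = c - 1 := by ring
          rw [this]; exact h
    rw [hA, hre, hBval, hreq]
    norm_num
  · -- c odd: mod c 2 = 1, s_root = c
    have hmod : PySem.Int.mod c 2 = 1 := by
      rw [PySem.Int.mod_eq_emod_of_pos (by norm_num)]; omega
    have hBval : find_square_roots_alt number
        = (c, PySem.List.pyRange 3 (c + 1) 2) := by
      simp only [find_square_roots_alt]
      rw [← hc, hmod]
      norm_num
    have hreq : r = c := by
      apply pv_odd_min_unique number r c hodd
      · exact ⟨m.toNat, by omega⟩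
      · exact hsq
      · exact hcsq
      · exact hmin'
      · rcases hcmin with h | h
        · left; omega
        · rcases eq_or_lt_of_le (by omega : (1 : Int) ≤ c) with h1 | h1
          · left; omega
          · right; nlinarith
    rw [hA, hre, hBval, hreq]
    norm_num
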